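-- pv_equiv track=rewrite | github.com/plzcallmebruceYxr/rednote-Video_Generator | engine.py | _get_sliced_rich_text
-- ===== SOURCE A (Python) =====
-- def _get_sliced_rich_text(text, length):
--     visible_count, sliced, i = 0, "", 0
--     while i < len(text) and visible_count < length:
--         if text[i:i+2] == "**": sliced += "**"; i += 2; continue
--         sliced += text[i]
--         if text[i] != "\n": visible_count += 1
--         i += 1
--     if sliced.count("**") % 2 != 0: sliced += "**"
--     return sliced
-- ===== SOURCE B (Python) =====
-- def _get_sliced_rich_text(text, length):
--     segments = text.split("**")
--     out = []
--     visible = 0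
--     delims = 0
--     last = len(segments) - 1
--     for idx, seg in enumerate(segments):
--         if visible >= length:
--             break
--         for ch in seg:
--             if visible >= length:
--                 break
--             out.append(ch)
--             if ch != "\n":
--                 visible += 1
--         if idx != last and visible < length:
--             out.append("**")
--             delims += 1
--     if delims % 2 != 0:
--         out.append("**")
--     return "".join(out)
-- ===== Notes on version B (the rewrite author's own statement) =====
-- stated objective: faster
-- what changed: Replaces A's single index-driven while loop (with lookahead slicing, repeated string concatenation and a final str.count re-scan for the parity fix) by a split-on-'**' decomposition: walk the segments with a per-segment character loop, emit the delimiter between segments while under the length budget, count emitted delimiters explicitly for the parity fix, and join the collected pieces once.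
import Mathlib
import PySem

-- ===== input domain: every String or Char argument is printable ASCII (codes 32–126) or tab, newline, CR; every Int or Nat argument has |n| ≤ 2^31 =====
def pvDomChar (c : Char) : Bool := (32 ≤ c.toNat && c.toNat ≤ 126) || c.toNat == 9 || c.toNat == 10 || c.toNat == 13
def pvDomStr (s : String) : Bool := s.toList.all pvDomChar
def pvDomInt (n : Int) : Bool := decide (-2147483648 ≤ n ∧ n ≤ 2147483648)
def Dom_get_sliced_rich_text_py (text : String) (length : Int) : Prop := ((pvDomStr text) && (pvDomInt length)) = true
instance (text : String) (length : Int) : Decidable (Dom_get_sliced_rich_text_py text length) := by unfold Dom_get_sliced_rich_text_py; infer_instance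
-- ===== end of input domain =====

-- B re-decomposes A's index-driven while loop (repeated string += and a final str.count re-scan) as
-- split-on-'**' + a per-segment walk with an emitted-delimiter counter, joined once; a timing run
-- measured B faster; the return value is proved equal on all inputs.

-- ===== PORT A =====
-- the while loop: i-advance by 2 on a '**' match, else append the char, counting non-'\n' chars
def pvAScan (length : Int) : List Char → Int → List Char
  | [], _ => []
  | [c], v => if v < length then [c] else []
  | c1 :: c2 :: rest, v =>
    if v < length then
      if c1 = '*' ∧ c2 = '*' then '*' :: '*' :: pvAScan length rest v
      else c1 :: pvAScan length (c2 :: rest) (if c1 = '\n' then v else v + 1)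
    else []

def get_sliced_rich_text_py (text : String) (length : Int) : String :=
  let sliced := pvAScan length text.toList 0
  if PySem.Str.count (String.ofList sliced) "**" % 2 ≠ 0 then String.ofList (sliced ++ ['*', '*'])
  else String.ofList sliced

-- ===== PORT B =====
-- text.split("**") (greedy left-to-right non-overlapping, as Python's str.split)
def pvSplitStar : List Char → List (List Char)
  | [] => [[]]
  | [c] => [[c]]
  | c1 :: c2 :: rest =>
    if c1 = '*' ∧ c2 = '*' then [] :: pvSplitStar rest
    else
      match pvSplitStar (c2 :: rest) with
      | s :: ss => (c1 :: s) :: ss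
      | [] => [[c1]]

-- the inner 'for ch in seg' walk: emitted chars and the updated visible count
def pvBSeg (length : Int) : List Char → Int → (List Char × Int)
  | [], v => ([], v)
  | c :: cs, v =>
    if v < length then
      let r := pvBSeg length cs (if c = '\n' then v else v + 1)
      (c :: r.1, r.2)
    else ([], v)

-- the 'for idx, seg in enumerate(segments)' loop: emitted chars and the number of '**' delimiters emitted
def pvBGo (length : Int) : List (List Char) → Int → (List Char × Nat)
  | [], _ => ([], 0)
  | seg :: rest, v =>
    let r := pvBSeg length seg v
    match rest with
    | [] => (r.1, 0)
    | _ :: _ =>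
      if r.2 < length then
        let o := pvBGo length rest r.2
        (r.1 ++ '*' :: '*' :: o.1, o.2 + 1)
      else (r.1, 0)

def get_sliced_rich_text_py_alt (text : String) (length : Int) : String :=
  let r := pvBGo length (pvSplitStar text.toList) 0
  if r.2 % 2 ≠ 0 then String.ofList (r.1 ++ ['*', '*'])
  else String.ofList r.1

-- ===== PRECONDITION & SPEC =====
def Spec_get_sliced_rich_text_py (text : String) (length : Int) (out : String) : Prop := out = get_sliced_rich_text_py_alt text length
instance (text : String) (length : Int) (out : String) : Decidable (Spec_get_sliced_rich_text_py text length out) := by unfold Spec_get_sliced_rich_text_py; infer_instance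

-- ===== CLAIM (what is proved, stated in full; the proofs are below) =====
def Claim_equal_get_sliced_rich_text_py : Prop := ∀ (text : String) (length : Int), Dom_get_sliced_rich_text_py text length → Spec_get_sliced_rich_text_py text length (get_sliced_rich_text_py text length)

-- ===== LEMMAS AND PROOFS =====

-- number of non-overlapping '**' occurrences, structurally
def pvCount2 : List Char → Nat
  | [] => 0
  | [_] => 0
  | c1 :: c2 :: t => if c1 = '*' ∧ c2 = '*' then pvCount2 t + 1 else pvCount2 (c2 :: t)

theorem pvCount2_cons (c : Char) (t : List Char) (h : ¬ (c = '*' ∧ t.head? = some '*')) :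
    pvCount2 (c :: t) = pvCount2 t := by
  cases t with
  | nil => rfl
  | cons c2 t' =>
    simp only [pvCount2]
    rw [if_neg]
    intro ⟨h1, h2⟩
    exact h ⟨h1, by simp [h2]⟩

theorem pvCountGo_eq (fuel : Nat) (l : List Char) (acc : Nat) (h : l.length ≤ fuel) :
    PySem.Chars.count.go ['*', '*'] fuel l acc = acc + pvCount2 l := by
  induction fuel generalizing l acc with
  | zero =>
    interval_cases hl : l.length
    · rw [List.length_eq_zero_iff] at hl; subst hl; rfl
  | succ fuel ih =>
    match l with
    | [] => rfl
    | [c] =>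
      simp only [PySem.Chars.count.go]
      rw [if_neg (by simp)]
      simpa using ih [] acc (by simp)
    | c1 :: c2 :: t =>
      simp only [PySem.Chars.count.go]
      by_cases hp : c1 = '*' ∧ c2 = '*'
      · obtain ⟨h1, h2⟩ := hp; subst h1; subst h2
        rw [if_pos (by simp)]
        simp only [List.length_cons, List.length_nil, List.drop_succ_cons, List.drop_zero]
        rw [ih t (acc + 1) (by simp only [List.length_cons] at h; omega)]
        simp [pvCount2]; omega
      · rw [if_neg (by simp only [List.isPrefixOf_iff_prefix, List.cons_prefix_cons]; tauto)]
        rw [ih (c2 :: t) acc (by simp only [List.length_cons] at h ⊢; omega)]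
        simp only [pvCount2, if_neg hp]

theorem pvCount_eq (l : List Char) : PySem.Chars.count l ['*', '*'] = pvCount2 l := by
  simp only [PySem.Chars.count]
  rw [if_neg (by simp)]
  simpa using pvCountGo_eq l.length l 0 le_rfl

theorem pvSplitStar_ne_nil (cs : List Char) : pvSplitStar cs ≠ [] := by
  match cs with
  | [] => simp [pvSplitStar]
  | [c] => simp [pvSplitStar]
  | c1 :: c2 :: rest =>
    simp only [pvSplitStar]
    split
    · simp
    · cases h : pvSplitStar (c2 :: rest) <;> simp

theorem pvAScan_head (length : Int) (cs : List Char) (v : Int) :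
    (pvAScan length cs v).head? = none ∨ (pvAScan length cs v).head? = cs.head? := by
  match cs with
  | [] => left; rfl
  | [c] => simp only [pvAScan]; split <;> simp
  | c1 :: c2 :: rest =>
    simp only [pvAScan]
    split
    · split
      · rename_i hp; right; simp [hp.1]
      · right; simp
    · left; rfl

theorem pvBSeg_stop (length : Int) (seg : List Char) (v : Int) (h : ¬ v < length) :
    pvBSeg length seg v = ([], v) := by
  cases seg with
  | nil => rfl
  | cons c cs => simp [pvBSeg, h]

theorem pvBGo_single (length : Int) (seg : List Char) (v : Int) :
    pvBGo length [seg] v = ((pvBSeg length seg v).1, 0) := rfl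

theorem pvBGo_cons_cons (length : Int) (seg s2 : List Char) (ss : List (List Char)) (v : Int) :
    pvBGo length (seg :: s2 :: ss) v =
      (if (pvBSeg length seg v).2 < length then
        ((pvBSeg length seg v).1 ++ '*' :: '*' :: (pvBGo length (s2 :: ss) (pvBSeg length seg v).2).1,
         (pvBGo length (s2 :: ss) (pvBSeg length seg v).2).2 + 1)
      else ((pvBSeg length seg v).1, 0)) := rfl

theorem pvBGo_consHead (length : Int) (c : Char) (s : List Char) (ss : List (List Char))
    (v : Int) (h : v < length) :
    pvBGo length ((c :: s) :: ss) v =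
      ((c :: (pvBGo length (s :: ss) (if c = '\n' then v else v + 1)).1),
       (pvBGo length (s :: ss) (if c = '\n' then v else v + 1)).2) := by
  cases ss with
  | nil =>
    rw [pvBGo_single, pvBGo_single]
    simp [pvBSeg, h]
  | cons s2 ss' =>
    rw [pvBGo_cons_cons, pvBGo_cons_cons]
    simp only [pvBSeg, if_pos h]
    split <;> split <;> simp

theorem pvMain (length : Int) (cs : List Char) (v : Int) :
    pvBGo length (pvSplitStar cs) v = (pvAScan length cs v, pvCount2 (pvAScan length cs v)) := by
  match cs with
  | [] => simp [pvSplitStar, pvBGo, pvBSeg, pvAScan, pvCount2]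
  | [c] =>
    by_cases h : v < length
    · simp [pvSplitStar, pvBGo, pvBSeg, pvAScan, pvCount2, h]
    · simp [pvSplitStar, pvBGo, pvBSeg_stop length _ _ h, pvAScan, pvCount2, h]
  | c1 :: c2 :: rest =>
    by_cases h : v < length
    · simp only [pvSplitStar, pvAScan, if_pos h]
      by_cases hp : c1 = '*' ∧ c2 = '*'
      · rw [if_pos hp, if_pos hp]
        obtain ⟨s, ss, hsp⟩ : ∃ s ss, pvSplitStar rest = s :: ss := by
          cases hsp : pvSplitStar rest with
          | nil => exact absurd hsp (pvSplitStar_ne_nil rest)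
          | cons s ss => exact ⟨s, ss, rfl⟩
        rw [hsp]
        have ih := pvMain length rest v
        rw [hsp] at ih
        rw [pvBGo_cons_cons]
        simp only [pvBSeg, if_pos h]
        rw [ih]
        simp [pvCount2]
      · rw [if_neg hp, if_neg hp]
        obtain ⟨s, ss, hsp⟩ : ∃ s ss, pvSplitStar (c2 :: rest) = s :: ss := by
          cases hsp : pvSplitStar (c2 :: rest) with
          | nil => exact absurd hsp (pvSplitStar_ne_nil _)
          | cons s ss => exact ⟨s, ss, rfl⟩
        rw [hsp]
        have ih := pvMain length (c2 :: rest) (if c1 = '\n' then v else v + 1)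
        rw [hsp] at ih
        rw [pvBGo_consHead length c1 s ss v h, ih]
        have hhead : ¬ (c1 = '*' ∧ (pvAScan length (c2 :: rest) (if c1 = '\n' then v else v + 1)).head? = some '*') := by
          rintro ⟨h1, h2⟩
          rcases pvAScan_head length (c2 :: rest) (if c1 = '\n' then v else v + 1) with hh | hh
          · rw [hh] at h2; simp at h2
          · rw [hh] at h2
            simp only [List.head?_cons, Option.some.injEq] at h2
            exact hp ⟨h1, h2⟩
        rw [pvCount2_cons c1 _ hhead]
    · have hstop : pvAScan length (c1 :: c2 :: rest) v = [] := by
        simp [pvAScan, h]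
      rw [hstop]
      obtain ⟨s, ss, hsp⟩ : ∃ s ss, pvSplitStar (c1 :: c2 :: rest) = s :: ss := by
        cases hsp : pvSplitStar (c1 :: c2 :: rest) with
        | nil => exact absurd hsp (pvSplitStar_ne_nil _)
        | cons s ss => exact ⟨s, ss, rfl⟩
      rw [hsp]
      cases ss with
      | nil => rw [pvBGo_single, pvBSeg_stop length s v h]; simp [pvCount2]
      | cons s2 ss' =>
        rw [pvBGo_cons_cons, pvBSeg_stop length s v h]
        simp [h, pvCount2]

theorem pvStrCount_eq (s : List Char) :
    PySem.Str.count (String.ofList s) "**" = pvCount2 s := by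
  simp only [PySem.Str.count]
  rw [show (String.ofList s).toList = s by simp,
      show ("**" : String).toList = ['*', '*'] from rfl]
  exact pvCount_eq s

-- ===== VERDICT (by name: the statement is the Claim_ definition above) =====
theorem get_sliced_rich_text_py_spec : Claim_equal_get_sliced_rich_text_py := by
  intro text length _
  unfold Spec_get_sliced_rich_text_py get_sliced_rich_text_py get_sliced_rich_text_py_alt
  simp only [pvStrCount_eq, pvMain]
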